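-- pv_equiv track=rewrite | github.com/Anubhav012345/Leetcode- | 4068-sum-of-elements-with-frequency-divisible-by-k/sum-of-elements-with-frequency-divisible-by-k.py | sumDivisibleByK
-- ===== SOURCE A (Python) =====
-- from typing import List
--
-- def sumDivisibleByK(nums: List[int], k: int) -> int:
--     hash_map={}
--     for i in range(len(nums)):
--         hash_map[nums[i]]=hash_map.get(nums[i],0)+1
--     result=0
--     for key,value in hash_map.items():
--         if value==k or value%k==0:
--             result+=key*value
--     return result
-- ===== SOURCE B (Python) =====
-- from typing import List
--
-- def sumDivisibleByK(nums: List[int], k: int) -> int: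
--     s = sorted(nums)
--     if not s:
--         return 0
--     result = 0
--     v = s[0]
--     c = 1
--     for x in s[1:]:
--         if x == v:
--             c += 1
--         else:
--             if c % k == 0:
--                 result += v * c
--             v, c = x, 1
--     if c % k == 0:
--         result += v * c
--     return result
-- ===== Notes on version B (the rewrite author's own statement) =====
-- stated objective: alternative
-- what changed: B replaces A's hash-map frequency dict with a sort of a copy followed by a single run-length scan over the sorted list, adding value*count per run when count % k == 0 (A's redundant value==k branch is dropped).
import Mathlib
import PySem

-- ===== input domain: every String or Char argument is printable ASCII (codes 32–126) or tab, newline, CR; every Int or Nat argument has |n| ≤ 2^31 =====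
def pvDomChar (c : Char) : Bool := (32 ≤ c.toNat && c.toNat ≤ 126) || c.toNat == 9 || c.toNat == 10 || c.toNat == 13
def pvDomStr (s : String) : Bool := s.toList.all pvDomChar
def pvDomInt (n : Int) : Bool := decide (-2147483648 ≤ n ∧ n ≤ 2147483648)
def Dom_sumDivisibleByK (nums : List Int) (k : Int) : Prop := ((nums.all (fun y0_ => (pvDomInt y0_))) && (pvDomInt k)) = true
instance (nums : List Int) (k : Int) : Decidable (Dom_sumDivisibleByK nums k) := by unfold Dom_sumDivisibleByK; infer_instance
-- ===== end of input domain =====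

-- B sorts a copy and run-length-scans it instead of building A's hash-map of frequencies (alternative algorithm, same result).

-- ===== PORT A =====
def sumDivisibleByK (nums : List Int) (k : Int) : Int :=
  let hash_map : PySem.Dict Int Int :=
    (PySem.List.pyRange 0 nums.length 1).foldl
      (fun d i => d.insert (PySem.List.pyGetD nums i 0) (d.getD (PySem.List.pyGetD nums i 0) 0 + 1))
      PySem.Dict.empty
  hash_map.items.foldl
    (fun result kv => if kv.2 == k || PySem.Int.mod kv.2 k == 0 then result + kv.1 * kv.2 else result)
    0

-- ===== PORT B =====
-- the run-length loop of Source B: state (result, v, c), finishing with the last run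
def altRun (k : Int) (result v c : Int) : List Int → Int
  | [] => if PySem.Int.mod c k == 0 then result + v * c else result
  | x :: xs =>
      if x == v then altRun k result v (c + 1) xs
      else altRun k (if PySem.Int.mod c k == 0 then result + v * c else result) x 1 xs

def sumDivisibleByK_alt (nums : List Int) (k : Int) : Int :=
  match PySem.List.sorted nums (fun x => x) false with
  | [] => 0
  | x :: xs => altRun k 0 x 1 xs

-- ===== PRECONDITION & SPEC =====
-- Pre_ excludes k = 0 with nonempty nums: there both A and B hit `count % 0` and raise ZeroDivisionError.
def Pre_sumDivisibleByK (nums : List Int) (k : Int) : Prop := k ≠ 0 ∨ nums = []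
instance (nums : List Int) (k : Int) : Decidable (Pre_sumDivisibleByK nums k) := by unfold Pre_sumDivisibleByK; infer_instance
def pvWitness_sumDivisibleByK : List Int × Int := ([1, 2, 1], 2)

def Spec_sumDivisibleByK (nums : List Int) (k : Int) (out : Int) : Prop := out = sumDivisibleByK_alt nums k
instance (nums : List Int) (k : Int) (out : Int) : Decidable (Spec_sumDivisibleByK nums k out) := by unfold Spec_sumDivisibleByK; infer_instance

-- ===== CLAIM (what is proved, stated in full; the proofs are below) =====
def Claim_equal_sumDivisibleByK : Prop := ∀ (nums : List Int) (k : Int), Dom_sumDivisibleByK nums k → Pre_sumDivisibleByK nums k → Spec_sumDivisibleByK nums k (sumDivisibleByK nums k)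

-- ===== LEMMAS AND PROOFS =====

-- contribution of one distinct value u with count c
def contrib (k u c : Int) : Int := if PySem.Int.mod c k == 0 then u * c else 0

-- recursive "sum over distinct values" of a list, first-occurrence order
def S (k : Int) : List Int → Int
  | [] => 0
  | x :: l => contrib k x (1 + l.count x) + S k (l.filter (fun y => y != x))
termination_by l => l.length
decreasing_by simp; exact List.length_filter_le _ _

lemma altRun_eq (k v : Int) (xs : List Int) (h : (v :: xs).Pairwise (· ≤ ·)) :
    ∀ r c : Int, altRun k r v c xs = r + contrib k v (c + xs.count v) + S k (xs.filter (fun y => y != v)) := by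
  induction xs generalizing v with
  | nil =>
      intro r c
      simp only [altRun, List.count_nil, List.filter_nil, S, contrib, Nat.cast_zero, add_zero]
      split_ifs <;> ring
  | cons x t ih =>
      intro r c
      rw [List.pairwise_cons] at h
      by_cases hxv : x = v
      · subst hxv
        have hpair : (x :: t).Pairwise (· ≤ ·) := h.2
        simp only [altRun, BEq.rfl, if_pos]
        rw [ih _ hpair r (c + 1)]
        have : List.filter (fun y => y != x) (x :: t) = List.filter (fun y => y != x) t := by
          simp
        rw [this, List.count_cons_self]
        have harg : c + 1 + (List.count x t : Int) = c + ((List.count x t + 1 : Nat) : Int) := by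
          push_cast; ring
        rw [harg]
      · have hne : (x == v) = false := by simp [hxv]
        simp only [altRun, hne, Bool.false_eq_true, if_false]
        have hxt : ∀ y ∈ t, x ≤ y := fun y hy => List.rel_of_pairwise_cons h.2 hy
        have hvx : v < x := lt_of_le_of_ne (h.1 x (List.mem_cons_self)) (Ne.symm hxv)
        have hallne : ∀ y ∈ x :: t, y ≠ v := by
          intro y hy
          rcases List.mem_cons.mp hy with rfl | hyt
          · exact hxv
          · exact fun hyv => absurd (hyv ▸ hxt y hyt) (not_le.mpr hvx)
        have hcount : (x :: t).count v = 0 := by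
          rw [List.count_eq_zero]; intro hv; exact hallne v hv rfl
        have hfilt : List.filter (fun y => y != v) (x :: t) = x :: t := by
          rw [List.filter_eq_self]; intro y hy; simpa using hallne y hy
        rw [ih _ h.2 _ 1, hcount, hfilt]
        show _ = r + contrib k v (c + 0) + S k (x :: t)
        simp only [S, contrib, add_zero]
        split_ifs <;> ring

lemma S_eq_sum (k : Int) (l : List Int) :
    S k l = ∑ u ∈ l.toFinset, contrib k u (l.count u) := by
  fun_induction S k l with
  | case1 => simp
  | case2 x t ih =>
      simp only [List.unattach_filter, List.unattach_attach] at ih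
      rw [ih]
      have hft : (List.filter (fun y => y != x) t).toFinset = t.toFinset.erase x := by
        ext u
        simp [List.mem_toFinset, Finset.mem_erase, and_comm]
      have hcnt : ∀ u ∈ t.toFinset.erase x,
          (List.filter (fun y => y != x) t).count u = (x :: t).count u := by
        intro u hu
        have hux : u ≠ x := (Finset.mem_erase.mp hu).1
        rw [List.count_filter (by simpa using hux)]
        simp [List.count_cons]
        exact fun h => hux h.symm

      rw [List.toFinset_cons]
      rw [← Finset.add_sum_erase _ _ (Finset.mem_insert_self x t.toFinset)]
      rw [Finset.erase_insert_eq_erase]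
      congr 1
      · rw [List.count_cons_self]
        congr 1
        omega
      · rw [hft]
        exact Finset.sum_congr rfl (fun u hu => by rw [hcnt u hu])

lemma foldl_if_add (p : Int × Int → Bool) (g : Int × Int → Int) (l : List (Int × Int)) (a : Int) :
    l.foldl (fun r kv => if p kv then r + g kv else r) a
      = a + (l.map (fun kv => if p kv then g kv else 0)).sum := by
  induction l generalizing a with
  | nil => simp
  | cons x t ih => simp [List.foldl_cons, ih]; split_ifs <;> ring

lemma a_eq_sum (nums : List Int) (k : Int) :
    sumDivisibleByK nums k = ∑ u ∈ nums.toFinset, contrib k u (nums.count u) := by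
  have h1 : (PySem.List.pyRange 0 (nums.length : Int) 1).foldl
      (fun (d : PySem.Dict Int Int) i => PySem.Dict.insert d (PySem.List.pyGetD nums i 0) (PySem.Dict.getD d (PySem.List.pyGetD nums i 0) 0 + 1))
      PySem.Dict.empty
      = nums.foldl (fun d x => d.insert x (d.getD x 0 + 1)) PySem.Dict.empty :=
    PySem.List.foldl_pyRange_zero_pyGetD' nums 0 (fun (d : PySem.Dict Int Int) (x : Int) => d.insert x (d.getD x 0 + 1)) PySem.Dict.empty
  unfold sumDivisibleByK
  simp only [h1, PySem.Dict.foldl_insert_getD_add_one_eq_counter, PySem.Dict.items_counter]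
  rw [foldl_if_add, List.map_map, zero_add]
  rw [← List.sum_toFinset _ (PySem.Set.nodup_ofList nums)]
  have hfs : (PySem.Set.ofList nums).toFinset = nums.toFinset := by
    ext u; simp [List.mem_toFinset, PySem.Set.mem_ofList]
  rw [hfs]
  refine Finset.sum_congr rfl (fun u hu => ?_)
  simp only [Function.comp]
  unfold contrib
  by_cases hck : (nums.count u : Int) = k
  · have : PySem.Int.mod (nums.count u : Int) k = 0 := by
      rw [PySem.Int.mod_eq_zero_iff_dvd, hck]
    simp [this]
  · simp [hck]

lemma b_eq_sum (nums : List Int) (k : Int) :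
    sumDivisibleByK_alt nums k = ∑ u ∈ nums.toFinset, contrib k u (nums.count u) := by
  unfold sumDivisibleByK_alt
  rcases hs : PySem.List.sorted nums (fun x => x) false with _ | ⟨x, xs⟩
  · have : nums = [] := by rwa [PySem.List.sorted_eq_nil_iff] at hs
    subst this; simp
  · have hperm : (x :: xs).Perm nums := hs ▸ PySem.List.sorted_perm nums (fun x => x) false
    have hpair : (x :: xs).Pairwise (· ≤ ·) := by
      have := PySem.List.sorted_pairwise nums (fun x => x)
      rwa [hs] at this
    show altRun k 0 x 1 xs = _
    rw [altRun_eq k x xs hpair 0 1, zero_add]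
    have hS : S k (x :: xs) = contrib k x (1 + xs.count x) + S k (xs.filter (fun y => y != x)) := by
      rw [S.eq_def]
    rw [← hS, S_eq_sum]
    rw [← List.toFinset_eq_of_perm _ _ hperm]
    exact Finset.sum_congr rfl (fun u _ => by rw [hperm.count_eq u])

-- ===== VERDICT (by name: the statement is the Claim_ definition above) =====
theorem sumDivisibleByK_spec : Claim_equal_sumDivisibleByK := by
  intro nums k _ hpre
  unfold Spec_sumDivisibleByK
  rw [a_eq_sum, b_eq_sum]
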